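-- pv_equiv track=rewrite | github.com/SterreStorm/AOC2022 | day3.py | find_common_denominator
-- ===== SOURCE A (Python) =====
-- def find_common_denominator(line):
--     common_denominator = ""
--     line = line.strip()
--     string1 = line[:len(line)//2]
--     string2 = line[len(line)//2:]
--     for letter1 in string1:
--         for letter2 in string2:
--             if letter1 == letter2:
--                 common_denominator = letter1
--     return common_denominator
-- ===== SOURCE B (Python) =====
-- def find_common_denominator(line):
--     line = line.strip()
--     half = len(line) // 2
--     string1 = line[:half]
--     string2 = line[half:]
--     seen = set(string2)
--     for letter in reversed(string1):
--         if letter in seen: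
--             return letter
--     return ""
-- ===== Notes on version B (the rewrite author's own statement) =====
-- stated objective: faster
-- what changed: Replaces the nested forward scan that keeps overwriting the answer with building the set of second-half characters once and a single reverse pass over the first half that returns at the first hit.
import Mathlib
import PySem

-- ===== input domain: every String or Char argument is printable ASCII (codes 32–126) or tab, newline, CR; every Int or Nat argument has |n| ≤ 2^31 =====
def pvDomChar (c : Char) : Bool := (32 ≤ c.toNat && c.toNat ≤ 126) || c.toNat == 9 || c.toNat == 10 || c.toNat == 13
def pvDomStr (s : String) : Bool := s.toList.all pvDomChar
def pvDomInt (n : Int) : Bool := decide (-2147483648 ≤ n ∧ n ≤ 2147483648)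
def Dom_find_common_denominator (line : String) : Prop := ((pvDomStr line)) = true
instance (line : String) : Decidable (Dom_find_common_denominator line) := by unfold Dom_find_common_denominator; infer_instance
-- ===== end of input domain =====

-- B replaces A's nested quadratic overwrite scan by building the set of second-half
-- characters once and making a single reverse pass with early return over the first half (objective: faster).
-- ===== PORT A =====
def find_common_denominator (line : String) : String :=
  let cs := PySem.Chars.strip line.toList
  let half := PySem.Int.floordiv (cs.length : Int) 2
  let string1 := PySem.List.slice cs none (some half)
  let string2 := PySem.List.slice cs (some half) none
  String.ofList (string1.foldl
    (fun acc letter1 =>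
      string2.foldl (fun acc2 letter2 => if letter1 = letter2 then [letter1] else acc2) acc)
    [])

-- ===== PORT B =====
def find_common_denominator_alt (line : String) : String :=
  let cs := PySem.Chars.strip line.toList
  let half := cs.length / 2
  let string1 := cs.take half
  let string2 := cs.drop half
  let seen : PySem.Set Char := PySem.Set.ofList string2
  match string1.reverse.find? (fun c => PySem.Set.contains seen c) with
  | some c => String.ofList [c]
  | none => ""

-- ===== PRECONDITION & SPEC =====
def Spec_find_common_denominator (line : String) (out : String) : Prop := out = find_common_denominator_alt line
instance (line : String) (out : String) : Decidable (Spec_find_common_denominator line out) := by unfold Spec_find_common_denominator; infer_instance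

-- ===== CLAIM (what is proved, stated in full; the proofs are below) =====
def Claim_equal_find_common_denominator : Prop := ∀ (line : String), Dom_find_common_denominator line → Spec_find_common_denominator line (find_common_denominator line)

-- ===== LEMMAS AND PROOFS =====

-- inner loop of A: the whole scan over string2 is just a membership test
lemma inner_scan (c1 : Char) : ∀ (s2 : List Char) (acc : List Char),
    s2.foldl (fun acc2 c2 => if c1 = c2 then [c1] else acc2) acc
      = if s2.contains c1 then [c1] else acc := by
  intro s2
  induction s2 with
  | nil => intro acc; simp
  | cons c rest ih =>
      intro acc
      simp only [List.foldl_cons, ih, List.contains_cons]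
      by_cases hr : c1 ∈ rest
      · simp [hr]
      · by_cases h : c1 = c <;> simp [hr, h]

-- outer loop of A: last match forward = first match on the reverse
lemma outer_scan (p : Char → Bool) : ∀ (s1 : List Char) (acc : List Char),
    s1.foldl (fun acc c => if p c then [c] else acc) acc
      = match s1.reverse.find? p with
        | some c => [c]
        | none => acc := by
  intro s1
  induction s1 with
  | nil => intro acc; simp
  | cons c rest ih =>
      intro acc
      simp only [List.foldl_cons, ih, List.reverse_cons, List.find?_append]
      cases h : rest.reverse.find? p with
      | some d => simp
      | none =>
          by_cases hp : p c <;> simp [List.find?, hp]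

lemma set_contains_eq (s : List Char) (c : Char) :
    PySem.Set.contains (PySem.Set.ofList s) c = s.contains c := by
  rcases h : s.contains c
  · simp only [Bool.eq_false_iff]
    intro hc
    rw [PySem.Set.contains_iff, PySem.Set.mem_ofList] at hc
    simp only [← List.contains_iff_mem, h] at hc
    exact Bool.false_ne_true hc
  · rw [PySem.Set.contains_iff, PySem.Set.mem_ofList, ← List.contains_iff_mem]
    exact h

-- ===== VERDICT (by name: the statement is the Claim_ definition above) =====
theorem find_common_denominator_spec : Claim_equal_find_common_denominator := by
  intro line _
  unfold Spec_find_common_denominator find_common_denominator find_common_denominator_alt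
  dsimp only
  set cs := PySem.Chars.strip line.toList with hcs
  have hhalf : PySem.Int.floordiv (cs.length : Int) 2 = ((cs.length / 2 : Nat) : Int) := by
    exact_mod_cast PySem.Int.floordiv_natCast cs.length 2
  rw [hhalf, PySem.List.slice_from_natCast, PySem.List.slice_to_natCast]
  rw [show (fun acc letter1 => (cs.drop (cs.length / 2)).foldl
        (fun acc2 letter2 => if letter1 = letter2 then [letter1] else acc2) acc)
      = (fun acc c => if (cs.drop (cs.length / 2)).contains c then [c] else acc) from
        funext fun acc => funext fun c => inner_scan c _ acc]
  rw [outer_scan]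
  simp only [set_contains_eq]
  cases h : (cs.take (cs.length / 2)).reverse.find?
      (fun c => (cs.drop (cs.length / 2)).contains c) <;> simp
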